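-- pv_equiv track=rewrite | github.com/blzzua/codewars | 7-kyu/zerobalanced_array.py | is_zero_balanced
-- ===== SOURCE A (Python) =====
-- def is_zero_balanced(arr):
--     if sum(arr) != 0 or len(arr) == 0:
--         return False
--     arr = sorted(arr)
--     while len(arr)>1:
--         if arr.pop(0) != -arr.pop():
--             return False
--     return True
-- ===== SOURCE B (Python) =====
-- def is_zero_balanced(arr):
--     if not arr or sum(arr) != 0:
--         return False
--     s = sorted(arr)
--     return all(x == -y for x, y in zip(s, reversed(s)))
-- ===== Notes on version B (the rewrite author's own statement) =====
-- stated objective: alternative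
-- what changed: Replaced the destructive while-loop that pops from both ends of the sorted list with a single non-mutating pass zipping the sorted list against its reverse.
import Mathlib
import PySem

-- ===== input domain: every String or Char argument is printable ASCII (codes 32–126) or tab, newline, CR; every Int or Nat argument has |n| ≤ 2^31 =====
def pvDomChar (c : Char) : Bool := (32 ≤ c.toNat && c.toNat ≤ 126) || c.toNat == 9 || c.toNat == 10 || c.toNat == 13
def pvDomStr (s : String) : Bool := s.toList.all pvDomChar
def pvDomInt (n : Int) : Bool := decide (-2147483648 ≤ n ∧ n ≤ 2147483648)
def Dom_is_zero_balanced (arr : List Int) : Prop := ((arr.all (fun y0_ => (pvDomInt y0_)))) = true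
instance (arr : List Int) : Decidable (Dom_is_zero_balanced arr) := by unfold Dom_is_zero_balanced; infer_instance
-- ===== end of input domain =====

-- B replaces A's destructive pop-from-both-ends while loop by one non-mutating pass
-- zipping the sorted list with its reverse: objective 'alternative'.

-- ===== PORT A =====
-- the 'while len(arr)>1: if arr.pop(0) != -arr.pop(): return False' loop, step for step:
-- pop(0) = head, pop() = last of the remaining tail; the loop continues on the middle part
def pyLoopA (arr : List Int) : Bool :=
  if _h : 1 < arr.length then
    if arr.headI ≠ -(arr.tail.getLast!) then false
    else pyLoopA arr.tail.dropLast
  else true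
termination_by arr.length
decreasing_by simp [List.length_dropLast, List.length_tail]; omega

def is_zero_balanced (arr : List Int) : Bool :=
  if arr.sum != 0 || arr.length == 0 then false
  else pyLoopA (PySem.List.sorted arr (fun x => x) false)

-- ===== PORT B =====
def is_zero_balanced_alt (arr : List Int) : Bool :=
  if arr.isEmpty || arr.sum != 0 then false
  else
    let s := PySem.List.sorted arr (fun x => x) false
    (s.zip s.reverse).all (fun p => p.1 == -p.2)

-- ===== PRECONDITION & SPEC =====
def Spec_is_zero_balanced (arr : List Int) (out : Bool) : Prop := out = is_zero_balanced_alt arr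
instance (arr : List Int) (out : Bool) : Decidable (Spec_is_zero_balanced arr out) := by unfold Spec_is_zero_balanced; infer_instance

-- ===== CLAIM (what is proved, stated in full; the proofs are below) =====
def Claim_equal_is_zero_balanced : Prop := ∀ (arr : List Int), Dom_is_zero_balanced arr → Spec_is_zero_balanced arr (is_zero_balanced arr)

-- ===== LEMMAS AND PROOFS =====

-- on any list of sum 0, A's two-ended loop and B's zip-with-reverse scan agree
theorem pyLoopA_eq_zip (n : Nat) : ∀ s : List Int, s.length ≤ n → s.sum = 0 →
    pyLoopA s = (s.zip s.reverse).all (fun p => p.1 == -p.2) := by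
  induction n with
  | zero =>
    intro s hlen _
    have : s = [] := List.length_eq_zero_iff.mp (Nat.le_zero.mp hlen)
    subst this; rw [pyLoopA]; simp
  | succ n ih =>
    intro s hlen hsum
    match s with
    | [] => rw [pyLoopA]; simp
    | [x] =>
      have hx : x = 0 := by simpa using hsum
      subst hx; rw [pyLoopA]; simp
    | a :: b :: xs =>
      have hrest : (b :: xs) ≠ [] := by simp
      set gl := (b :: xs).getLast hrest with hgl
      set m := (b :: xs).dropLast with hm
      have hsplit : (b :: xs) = m ++ [gl] := (List.dropLast_append_getLast hrest).symm
      have hS : (a :: b :: xs) = a :: (m ++ [gl]) := by rw [← hsplit]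
      have hL : pyLoopA (a :: b :: xs) =
          if a ≠ -gl then false else pyLoopA m := by
        rw [pyLoopA]
        have h1 : 1 < (a :: b :: xs).length := by simp
        rw [dif_pos h1]
        have hgd : (b :: xs).getLast! = gl := by
          simp [List.getLast!_eq_getLast?_getD, List.getLast?_eq_getLast_of_ne_nil hrest, hgl]
        simp only [List.headI, List.tail_cons, hgd, hm]
      have hlen' : xs.length + 2 ≤ n + 1 := by simpa using hlen
      have hlm : (b :: xs).length = m.length + 1 := by rw [hsplit]; simp
      have hlenm : m.length ≤ n := by simp at hlm; omega
      have hzip : ((a :: (m ++ [gl])).zip (a :: (m ++ [gl])).reverse) =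
          (a, gl) :: (m.zip m.reverse ++ [(gl, a)]) := by
        have hrev : (a :: (m ++ [gl])).reverse = gl :: (m.reverse ++ [a]) := by simp
        rw [hrev, List.zip_cons_cons, List.zip_append (by simp)]
        simp
      rw [hL, hS, hzip]
      by_cases hcase : a = -gl
      · have hsum' : m.sum = 0 := by
          rw [hS] at hsum; simp at hsum; omega
        have hIH := ih m hlenm hsum'
        rw [if_neg (by simpa using hcase), hIH]
        subst hcase
        simp
      · rw [if_pos (by simpa using hcase)]
        symm
        rw [List.all_eq_false]
        exact ⟨(a, gl), List.mem_cons_self, by simpa using hcase⟩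

-- ===== VERDICT (by name: the statement is the Claim_ definition above) =====
theorem is_zero_balanced_spec : Claim_equal_is_zero_balanced := by
  intro arr _
  unfold Spec_is_zero_balanced is_zero_balanced is_zero_balanced_alt
  by_cases hnil : arr = []
  · subst hnil; rfl
  · by_cases hsum : arr.sum = 0
    · have hlen : arr.length ≠ 0 := fun h => hnil (List.length_eq_zero_iff.mp h)
      rw [if_neg (by simp [hsum, hlen]), if_neg (by simp [hsum, hnil])]
      set s := PySem.List.sorted arr (fun x => x) false with hs
      have hperm : s.Perm arr := PySem.List.sorted_perm ..
      have hsum' : s.sum = 0 := by rw [hperm.sum_eq]; exact hsum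
      exact pyLoopA_eq_zip s.length s le_rfl hsum'
    · rw [if_pos (by simp [hsum]), if_pos (by simp [hsum])]
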